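-- pv_equiv track=rewrite | github.com/Petsku01/Prompt-Security-Guide | tools/legacy/ultrabreaks_attacks.py | cypher_encode
-- ===== SOURCE A (Python) =====
-- def cypher_encode(text):
--     """Encode text using Cyph3r substitution"""
--     replacements = {
--         'i': '!',
--         's': '§',
--         'a': '@',
--         'e': 'e̶',
--         'b': 'β',
--         'u': 'µ',
--         'I': '!',
--         'S': '§',
--         'A': '@',
--         'E': 'E̶',
--         'B': 'β',
--         'U': 'µ'
--     }
--     result = text
--     for old, new in replacements.items():
--         result = result.replace(old, new)
--     return result
-- ===== SOURCE B (Python) =====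
-- def cypher_encode(text):
--     """Encode text using Cyph3r substitution"""
--     def sub(ch):
--         if ch in ('i', 'I'):
--             return '!'
--         if ch in ('s', 'S'):
--             return '§'
--         if ch in ('a', 'A'):
--             return '@'
--         if ch == 'e':
--             return 'e̶'
--         if ch == 'E':
--             return 'E̶'
--         if ch in ('b', 'B'):
--             return 'β'
--         if ch in ('u', 'U'):
--             return 'µ'
--         return ch
--     return ''.join(map(sub, text))
-- ===== Notes on version B (the rewrite author's own statement) =====
-- stated objective: idiomatic
-- what changed: Replaced A's 12 sequential whole-string str.replace passes (and the replacements dict) by one traversal of the characters through an explicit per-character substitution function with an if-chain, joined once.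
import Mathlib
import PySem

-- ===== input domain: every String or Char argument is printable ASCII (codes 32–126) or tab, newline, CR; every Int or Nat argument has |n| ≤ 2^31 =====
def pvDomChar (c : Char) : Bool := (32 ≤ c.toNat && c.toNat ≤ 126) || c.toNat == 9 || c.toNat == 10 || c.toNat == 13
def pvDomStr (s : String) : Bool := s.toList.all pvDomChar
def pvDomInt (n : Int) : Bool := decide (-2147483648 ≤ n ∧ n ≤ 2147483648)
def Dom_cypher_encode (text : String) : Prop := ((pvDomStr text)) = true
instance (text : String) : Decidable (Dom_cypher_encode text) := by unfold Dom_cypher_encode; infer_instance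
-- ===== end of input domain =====

-- B replaces A's 12 whole-string replace() passes (driven by a dict) by one traversal that maps each character through an explicit if-chain substitution function (idiomatic single pass, same result).

-- ===== PORT A =====
-- the replacements dict of A, in insertion order
def replA : PySem.Dict String String :=
  ⟨[("i", "!"), ("s", "§"), ("a", "@"), ("e", "e̶"), ("b", "β"), ("u", "µ"),
    ("I", "!"), ("S", "§"), ("A", "@"), ("E", "E̶"), ("B", "β"), ("U", "µ")]⟩

def cypher_encode (text : String) : String :=
  (PySem.Dict.items replA).foldl (fun r p => PySem.Str.replace r p.1 p.2) text

-- ===== PORT B =====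
-- B's per-character substitution helper (the inner `sub` of Source B)
def subB (ch : Char) : String :=
  if ch = 'i' ∨ ch = 'I' then "!"
  else if ch = 's' ∨ ch = 'S' then "§"
  else if ch = 'a' ∨ ch = 'A' then "@"
  else if ch = 'e' then "e̶"
  else if ch = 'E' then "E̶"
  else if ch = 'b' ∨ ch = 'B' then "β"
  else if ch = 'u' ∨ ch = 'U' then "µ"
  else String.singleton ch

def cypher_encode_alt (text : String) : String :=
  PySem.Str.join "" (text.toList.map subB)

-- ===== PRECONDITION & SPEC =====
def Spec_cypher_encode (text : String) (out : String) : Prop := out = cypher_encode_alt text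
instance (text : String) (out : String) : Decidable (Spec_cypher_encode text out) := by unfold Spec_cypher_encode; infer_instance

-- ===== CLAIM (what is proved, stated in full; the proofs are below) =====
def Claim_equal_cypher_encode : Prop := ∀ (text : String), Dom_cypher_encode text → Spec_cypher_encode text (cypher_encode text)

-- ===== LEMMAS AND PROOFS =====

-- single substitution step on one character
def sub1 (a : Char) (ns : List Char) (c : Char) : List Char := if c = a then ns else [c]

-- one replace() pass, character-wise
def step (a : Char) (ns : List Char) (l : List Char) : List Char := l.flatMap (sub1 a ns)

-- A's whole chain of 12 passes, on char lists
def chain (l : List Char) : List Char :=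
  step 'U' "µ".toList <| step 'B' "β".toList <| step 'E' "E̶".toList <|
  step 'A' "@".toList <| step 'S' "§".toList <| step 'I' "!".toList <|
  step 'u' "µ".toList <| step 'b' "β".toList <| step 'e' "e̶".toList <|
  step 'a' "@".toList <| step 's' "§".toList <| step 'i' "!".toList l

theorem go_single (a : Char) (ns : List Char) :
    ∀ (l : List Char) (fuel : Nat) (acc : List Char), l.length ≤ fuel →
      PySem.Chars.replace.go [a] ns fuel l acc = acc.reverse ++ l.flatMap (sub1 a ns) := by
  intro l
  induction l with
  | nil =>
    intro fuel acc _
    cases fuel <;> simp [PySem.Chars.replace.go]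
  | cons c t ih =>
    intro fuel acc hle
    cases fuel with
    | zero => simp at hle
    | succ n =>
      rw [PySem.Chars.replace.go]
      by_cases h : c = a
      · subst h
        have hpre : List.isPrefixOf [c] (c :: t) = true := by
          simp [List.isPrefixOf]
        rw [hpre]
        simp only [if_true]
        rw [show List.drop (List.length [c]) (c :: t) = t from rfl]
        rw [ih n (ns.reverse ++ acc) (by simpa using Nat.le_of_succ_le_succ hle)]
        simp [sub1]
      · have hpre : List.isPrefixOf [a] (c :: t) = false := by
          simp [List.isPrefixOf]
          exact fun hh => h hh.symm
        rw [hpre]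
        simp only [Bool.false_eq_true, if_false]
        rw [ih n (c :: acc) (by simpa using Nat.le_of_succ_le_succ hle)]
        simp [sub1, h]

theorem replace_single (s : List Char) (a : Char) (ns : List Char) :
    PySem.Chars.replace s [a] ns = s.flatMap (sub1 a ns) := by
  rw [PySem.Chars.replace]
  simp only [List.isEmpty_cons, Bool.false_eq_true, if_false]
  simpa using go_single a ns s s.length [] (le_refl _)

theorem A_chars (text : String) : (cypher_encode text).toList = chain text.toList := by
  simp only [cypher_encode, replA, List.foldl]
  simp only [PySem.Str.toList_replace, chain, step]
  simp only [show ("i":String).toList = ['i'] from rfl, show ("s":String).toList = ['s'] from rfl,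
             show ("a":String).toList = ['a'] from rfl, show ("e":String).toList = ['e'] from rfl,
             show ("b":String).toList = ['b'] from rfl, show ("u":String).toList = ['u'] from rfl,
             show ("I":String).toList = ['I'] from rfl, show ("S":String).toList = ['S'] from rfl,
             show ("A":String).toList = ['A'] from rfl, show ("E":String).toList = ['E'] from rfl,
             show ("B":String).toList = ['B'] from rfl, show ("U":String).toList = ['U'] from rfl]
  rw [replace_single, replace_single, replace_single, replace_single, replace_single,
      replace_single, replace_single, replace_single, replace_single, replace_single,
      replace_single, replace_single]

theorem chain_append (l₁ l₂ : List Char) : chain (l₁ ++ l₂) = chain l₁ ++ chain l₂ := by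
  simp [chain, step, List.flatMap_append]

theorem chain_single (c : Char) : chain [c] = (subB c).toList := by
  by_cases h1 : c = 'i'; · subst h1; decide
  by_cases h2 : c = 's'; · subst h2; decide
  by_cases h3 : c = 'a'; · subst h3; decide
  by_cases h4 : c = 'e'; · subst h4; decide
  by_cases h5 : c = 'b'; · subst h5; decide
  by_cases h6 : c = 'u'; · subst h6; decide
  by_cases h7 : c = 'I'; · subst h7; decide
  by_cases h8 : c = 'S'; · subst h8; decide
  by_cases h9 : c = 'A'; · subst h9; decide
  by_cases h10 : c = 'E'; · subst h10; decide
  by_cases h11 : c = 'B'; · subst h11; decide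
  by_cases h12 : c = 'U'; · subst h12; decide
  simp [chain, step, sub1, subB, h1, h2, h3, h4, h5, h6, h7, h8, h9, h10, h11, h12]

theorem intersperse_nil_flatten (l : List (List Char)) :
    (List.intersperse ([] : List Char) l).flatten = l.flatten := by
  induction l with
  | nil => rfl
  | cons h t ih => cases t <;> simp_all [List.intersperse]

theorem B_chars (text : String) :
    (cypher_encode_alt text).toList = text.toList.flatMap (fun c => (subB c).toList) := by
  simp only [cypher_encode_alt, PySem.Str.toList_join, PySem.Chars.join, List.intercalate]
  rw [show ("" : String).toList = [] from rfl, intersperse_nil_flatten]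
  rw [List.map_map, List.flatten_eq_flatMap, List.flatMap_map]
  simp only [Function.comp, id]

theorem chain_eq_flatMap (l : List Char) : chain l = l.flatMap (fun c => (subB c).toList) := by
  induction l with
  | nil => rfl
  | cons c t ih =>
    have : c :: t = [c] ++ t := rfl
    rw [this, chain_append, chain_single, List.flatMap_append, ih]
    simp

-- ===== VERDICT (by name: the statement is the Claim_ definition above) =====
theorem cypher_encode_spec : Claim_equal_cypher_encode := by
  intro text _
  unfold Spec_cypher_encode
  apply String.toList_inj.mp
  rw [A_chars, B_chars, chain_eq_flatMap]
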